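-- pv_equiv track=rewrite | github.com/acmuniandes/scraperRegistro | scraperRegistro.py | optimizarContinuidad
-- ===== SOURCE A (Python) =====
-- def optimizarContinuidad(horario):
--     horarioOptimizado = []
--     i = 0
--     esIntervaloContinuo = False
--     print (len(horario))
--     while i < len(horario)-1:
--         if not esIntervaloContinuo:
--             esIntervaloContinuo = esHorarioContinuo(horario[i], horario[i+1])
--             horarioOptimizado.append(horario[i])
--         else:
--             esIntervaloContinuo = esHorarioContinuo(horario[i], horario[i+1])
--             if not esIntervaloContinuo:
--                 horarioOptimizado.append(horario[i])
--         i += 1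
--     horarioOptimizado.append(horario[-1])#Agrego el último elemento
--     return horarioOptimizado
--
-- def esHorarioContinuo(horario1, horario2):
--     hayCambioHora = hayCambioDeHora(horario1,horario2)
--     if hayCambioHora:
--         if (int(horario2) - int(horario1) == 50):
--             return True
--         return False
--     else:
--         return int(horario2) - int(horario1) == 10
--
-- def hayCambioDeHora(horario1, horario2):
--     hora1 = int(str(horario1)[len(str(horario1))-3])
--     hora2 = int(str(horario2)[len(str(horario2))-3])
--
--     if abs(hora1-hora2) == 1 or abs(hora1-hora2) == 9:
--         return True
--     return False
-- ===== SOURCE B (Python) =====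
-- # B: run-segmentation decomposition — split the schedule into maximal continuous runs,
-- # then summarize each run as its first (and, if longer, last) element. Return value
-- # only; same print side effect as A. Alternative structure, same O(n) cost.
--
-- def optimizarContinuidad(horario):
--     print(len(horario))
--     runs = []
--     actual = [horario[0]]
--     for h in horario[1:]:
--         if esHorarioContinuo(actual[-1], h):
--             actual.append(h)
--         else:
--             runs.append(actual)
--             actual = [h]
--     runs.append(actual)
--     resultado = []
--     for run in runs:
--         if len(run) == 1:
--             resultado.append(run[0])
--         else:
--             resultado.append(run[0])
--             resultado.append(run[-1])
--     return resultado
--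
-- def esHorarioContinuo(horario1, horario2):
--     hayCambioHora = hayCambioDeHora(horario1,horario2)
--     if hayCambioHora:
--         if (int(horario2) - int(horario1) == 50):
--             return True
--         return False
--     else:
--         return int(horario2) - int(horario1) == 10
--
-- def hayCambioDeHora(horario1, horario2):
--     hora1 = int(str(horario1)[len(str(horario1))-3])
--     hora2 = int(str(horario2)[len(str(horario2))-3])
--
--     if abs(hora1-hora2) == 1 or abs(hora1-hora2) == 9:
--         return True
--     return False
-- ===== Notes on version B (the rewrite author's own statement) =====
-- stated objective: alternative
-- what changed: Replaces A's single stateful keep/drop loop (a carried esIntervaloContinuo flag deciding each append) by a run-segmentation decomposition: first split the schedule into maximal continuous runs, then emit each run's first element, plus its last element when the run is longer than one; the print and helpers stay.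
import Mathlib
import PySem

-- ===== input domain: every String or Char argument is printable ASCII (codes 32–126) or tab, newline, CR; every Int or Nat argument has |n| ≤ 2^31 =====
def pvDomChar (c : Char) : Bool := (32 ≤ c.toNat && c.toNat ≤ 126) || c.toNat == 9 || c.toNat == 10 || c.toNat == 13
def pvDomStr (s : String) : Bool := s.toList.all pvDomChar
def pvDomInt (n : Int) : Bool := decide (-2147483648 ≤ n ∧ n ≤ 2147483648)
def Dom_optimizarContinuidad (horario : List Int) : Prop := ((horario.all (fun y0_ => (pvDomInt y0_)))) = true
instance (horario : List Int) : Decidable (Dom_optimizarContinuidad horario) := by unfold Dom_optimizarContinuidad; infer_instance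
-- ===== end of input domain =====

-- ===== PORT A =====
-- B reorganizes A's carried-flag loop into run segmentation + per-run summarization; return value
-- only (A's print(len(horario)) side effect is not modelled; B performs the same print).

-- int(str(h)[len(str(h))-3]) — none exactly where Python raises (IndexError/ValueError)
def pvHoraDigit (h : Int) : Option Int :=
  let s := PySem.Int.toChars h
  match PySem.List.pyGet? s ((s.length : Int) - 3) with
  | some c => PySem.Int.ofChars? [c]
  | none => none

def pvHayCambioDeHora (h1 h2 : Int) : Option Bool :=
  match pvHoraDigit h1, pvHoraDigit h2 with
  | some hora1, some hora2 => some ((hora1 - hora2).natAbs == 1 || (hora1 - hora2).natAbs == 9)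
  | _, _ => none

-- where the Option is none Python raises; that is outside Pre_, the default false is never used there
def pvEsHorarioContinuo (h1 h2 : Int) : Bool :=
  match pvHayCambioDeHora h1 h2 with
  | some true => h2 - h1 == 50
  | some false => h2 - h1 == 10
  | none => false

-- A's while loop over i, carrying esIntervaloContinuo, as structural recursion on the suffix
def pvLoopA : Bool → List Int → List Int
  | _, [] => []          -- Python: horario[-1] raises IndexError here (outside Pre_)
  | _, [x] => [x]        -- loop over, append horario[-1]
  | flag, x :: y :: rest =>
      let c := pvEsHorarioContinuo x y
      if !flag then x :: pvLoopA c (y :: rest)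
      else if !c then x :: pvLoopA c (y :: rest)
      else pvLoopA c (y :: rest)

def optimizarContinuidad (horario : List Int) : List Int :=
  pvLoopA false horario

-- ===== PORT B =====
-- Source B's first loop: split into maximal continuous runs (actual = current run, in order)
def pvRunsB (actual : List Int) : List Int → List (List Int)
  | [] => [actual]
  | h :: rest =>
      if pvEsHorarioContinuo ((PySem.List.pyGet? actual (-1)).getD 0) h then  -- actual[-1]
        pvRunsB (actual ++ [h]) rest
      else
        actual :: pvRunsB [h] rest

-- Source B's second loop: each run contributes run[0] (and run[-1] when longer than one)
def pvSummarizeRun (run : List Int) : List Int :=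
  if run.length == 1 then [(PySem.List.pyGet? run 0).getD 0]
  else [(PySem.List.pyGet? run 0).getD 0, (PySem.List.pyGet? run (-1)).getD 0]

def optimizarContinuidad_alt (horario : List Int) : List Int :=
  match horario with
  | [] => []   -- horario[0] raises IndexError in Python here (outside Pre_)
  | x :: rest => (pvRunsB [x] rest).flatMap pvSummarizeRun

-- ===== PRECONDITION & SPEC =====
-- Pre_: exactly where A returns — nonempty (horario[-1]), and when the loop runs, every element h
-- must have a digit at str(h)[len-3] (h in 0..9 gives IndexError, h in -99..-10 gives ValueError).
def Pre_optimizarContinuidad (horario : List Int) : Prop :=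
  horario ≠ [] ∧
    (2 ≤ horario.length →
      ∀ h ∈ horario, 10 ≤ h ∨ h ≤ -100 ∨ (-9 ≤ h ∧ h ≤ -1))

instance (horario : List Int) : Decidable (Pre_optimizarContinuidad horario) := by
  unfold Pre_optimizarContinuidad; infer_instance

def pvWitness_optimizarContinuidad : List Int := [800, 810, 850, 900]

def Spec_optimizarContinuidad (horario : List Int) (out : List Int) : Prop := out = optimizarContinuidad_alt horario
instance (horario : List Int) (out : List Int) : Decidable (Spec_optimizarContinuidad horario out) := by unfold Spec_optimizarContinuidad; infer_instance

-- ===== CLAIM (what is proved, stated in full; the proofs are below) =====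
def Claim_equal_optimizarContinuidad : Prop := ∀ (horario : List Int), Dom_optimizarContinuidad horario → Pre_optimizarContinuidad horario → Spec_optimizarContinuidad horario (optimizarContinuidad horario)

-- ===== LEMMAS AND PROOFS =====

lemma pvSummarizeRun_long (q a : Int) (mid : List Int) :
    pvSummarizeRun (q :: (mid ++ [a])) = [q, a] := by
  have hlast : (q :: (mid ++ [a])).getLast? = some a := by
    rw [← List.cons_append, List.getLast?_concat]
  simp [pvSummarizeRun, PySem.List.pyGet?_zero, PySem.List.pyGet?_neg_one, hlast]

lemma pvLast_run (q a : Int) (mid : List Int) :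
    (PySem.List.pyGet? (q :: (mid ++ [a])) (-1)).getD 0 = a := by
  rw [PySem.List.pyGet?_neg_one, ← List.cons_append, List.getLast?_concat]
  rfl

-- the carried-flag loop equals the run-segmentation form:
-- from an in-progress run, B re-emits the run's head and then agrees with A's flag=true state;
-- from a fresh run, B agrees with A's flag=false state.
lemma pvRunsB_eq_loopA (rest : List Int) :
    (∀ a, pvLoopA false (a :: rest) = (pvRunsB [a] rest).flatMap pvSummarizeRun)
    ∧ (∀ q mid a, (pvRunsB (q :: (mid ++ [a])) rest).flatMap pvSummarizeRun
          = q :: pvLoopA true (a :: rest)) := by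
  induction rest with
  | nil =>
      refine ⟨fun a => ?_, fun q mid a => ?_⟩
      · simp [pvLoopA, pvRunsB, pvSummarizeRun]
      · simp [pvLoopA, pvRunsB, pvSummarizeRun_long q a mid]
  | cons h rest ih =>
      obtain ⟨ih1, ih2⟩ := ih
      refine ⟨fun a => ?_, fun q mid a => ?_⟩
      · by_cases hc : pvEsHorarioContinuo a h = true
        · have h2 := ih2 a [] h
          simp at h2
          simp [pvLoopA, pvRunsB, hc, PySem.List.pyGet?_neg_one]
          exact h2.symm
        · simp [pvLoopA, pvRunsB, hc, PySem.List.pyGet?_neg_one, pvSummarizeRun, ih1 h]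
      · have hlast := pvLast_run q a mid
        by_cases hc : pvEsHorarioContinuo a h = true
        · have h2 := ih2 q (mid ++ [a]) h
          simp at h2 ⊢
          simp [pvRunsB, pvLoopA, hlast, hc]
          simpa using h2
        · simp [pvRunsB, pvLoopA, hlast, hc, pvSummarizeRun_long q a mid, ih1 h]

-- ===== VERDICT (by name: the statement is the Claim_ definition above) =====
theorem optimizarContinuidad_spec : Claim_equal_optimizarContinuidad := by
  intro horario _ hpre
  obtain ⟨hne, -⟩ := hpre
  cases horario with
  | nil => exact absurd rfl hne
  | cons x rest =>
      unfold Spec_optimizarContinuidad optimizarContinuidad optimizarContinuidad_alt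
      exact (pvRunsB_eq_loopA rest).1 x
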